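-- pv_equiv track=rewrite | github.com/pypi-data/pypi-mirror-404 | packages/centurion-erp/centurion_erp-1.28.1-py3-none-any.whl/centurion_erp/centurion/helpers/merge_software.py | merge_software
-- ===== SOURCE A (Python) =====
-- def merge_software(software: list, new_software: list) -> list:
--     """ Merge two lists of software actions
--
--     Args:
--         software (list(dict)): Original list to merge over
--         new_software (list(dict)): new list to use to merge over
--
--     Returns:
--         list(dict): merged list of software actions
--     """
--
--     merge_software = []
--
--     merge: dict = {}
--
--     for original in software:
--
--         merge.update({
--             original['name']: original
--         })
--
--     for new in new_software:
--
--         merge.update({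
--             new['name']: new
--         })
--
--     for key, value in merge.items():
--
--         merge_software = merge_software + [ value ]
--
--     return merge_software
-- ===== SOURCE B (Python) =====
-- def merge_software(software: list, new_software: list) -> list:
--     """Merge two lists of software actions keyed by 'name': first-seen order,
--     last-written value wins.  Selection-style merge with no dictionary: repeatedly
--     take the head of the remaining items, scan the rest once to find the last item
--     with the same name (the winner) and to drop every same-named item, append the
--     winner, and continue with what is left."""
--
--     result = []
--     items = software + new_software
--     while items:
--         head = items[0]
--         name = head['name']
--         winner = head
--         rest = []
--         for x in items[1:]:
--             if x['name'] == name: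
--                 winner = x
--             else:
--                 rest.append(x)
--         result.append(winner)
--         items = rest
--     return result
-- ===== Notes on version B (the rewrite author's own statement) =====
-- stated objective: alternative
-- what changed: Replaces A's dict-of-objects accumulation (two update loops plus a concatenating extraction loop) by a dictionary-free selection merge: repeatedly scan the remaining items once per distinct name, keeping the last same-named item and recursing on the rest.
import Mathlib
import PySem

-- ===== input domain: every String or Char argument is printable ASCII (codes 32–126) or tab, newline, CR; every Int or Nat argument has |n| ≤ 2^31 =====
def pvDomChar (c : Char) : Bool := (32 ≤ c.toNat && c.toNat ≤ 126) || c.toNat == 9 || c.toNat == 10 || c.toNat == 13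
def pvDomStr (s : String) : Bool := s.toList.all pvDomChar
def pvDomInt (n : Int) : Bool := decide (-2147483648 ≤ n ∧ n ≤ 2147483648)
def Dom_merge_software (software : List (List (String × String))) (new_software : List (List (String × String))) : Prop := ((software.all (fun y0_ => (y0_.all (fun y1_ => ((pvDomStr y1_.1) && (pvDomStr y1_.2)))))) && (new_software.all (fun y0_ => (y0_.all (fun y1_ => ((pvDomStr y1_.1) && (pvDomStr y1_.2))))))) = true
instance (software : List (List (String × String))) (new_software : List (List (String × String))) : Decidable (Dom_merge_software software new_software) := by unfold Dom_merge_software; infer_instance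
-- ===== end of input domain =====

-- B replaces A's dict-of-objects accumulation by a dictionary-free selection merge
-- (repeatedly keep the last same-named item and drop the rest); return values only.

-- ===== PORT A =====
-- x['name'] on a Python dict: first-match lookup (none = KeyError, excluded by Pre_;
-- both ports key uniformly by the Option there, so nothing is claimed outside Pre_).
def pvName (d : List (String × String)) : Option String :=
  (PySem.Dict.mk d).get? "name"

-- loop body of A's two 'merge.update({ x['name']: x })' loops
def pvStepA (m : PySem.Dict (Option String) (List (String × String)))
    (o : List (String × String)) : PySem.Dict (Option String) (List (String × String)) :=
  m.insert (pvName o) o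

def merge_software (software : List (List (String × String))) (new_software : List (List (String × String))) : List (List (String × String)) :=
  let m1 := software.foldl pvStepA PySem.Dict.empty
  let m2 := new_software.foldl pvStepA m1
  -- for key, value in merge.items(): merge_software = merge_software + [ value ]
  m2.items.foldl (fun acc p => acc ++ [p.2]) []

-- ===== PORT B =====
-- B's own x['name'] lookup (first-match, none = KeyError, excluded by Pre_)
def pvNameB (d : List (String × String)) : Option String :=
  (PySem.Dict.mk d).get? "name"

-- inner for-loop of B: scans items[1:], keeping (winner, rest) as the accumulator
def pvScan (n : Option String) (w : List (String × String))
    (acc : List (List (String × String))) :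
    List (List (String × String)) → List (String × String) × List (List (String × String))
  | [] => (w, acc)
  | x :: xs => if pvNameB x = n then pvScan n x acc xs else pvScan n w (acc ++ [x]) xs

-- termination bound for pvGo: the rest never outgrows the scanned tail
lemma pvScan_len (n : Option String) (w : List (String × String))
    (acc : List (List (String × String))) (xs : List (List (String × String))) :
    (pvScan n w acc xs).2.length ≤ acc.length + xs.length := by
  induction xs generalizing w acc with
  | nil => simp [pvScan]
  | cons x xs ih => by_cases h : pvNameB x = n <;> simp [pvScan, h] <;>
      [exact le_trans (ih x acc) (by omega); exact le_trans (ih w (acc ++ [x])) (by simp; omega)]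

-- B's while loop: one selection round per iteration, items shrinks to rest
def pvGo : List (List (String × String)) → List (List (String × String))
  | [] => []
  | head :: t =>
    (pvScan (pvNameB head) head [] t).1 :: pvGo (pvScan (pvNameB head) head [] t).2
termination_by l => l.length
decreasing_by
  simpa using Nat.lt_succ_of_le (pvScan_len (pvNameB head) head [] t)

def merge_software_alt (software : List (List (String × String))) (new_software : List (List (String × String))) : List (List (String × String)) :=
  pvGo (software ++ new_software)

-- ===== PRECONDITION & SPEC =====
-- Pre_ excludes exactly the inputs where some software dict lacks the key 'name':
-- there Python A (and B) raise KeyError.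
def Pre_merge_software (software : List (List (String × String))) (new_software : List (List (String × String))) : Prop :=
  (software.all (fun d => d.any (fun p => p.1 == "name")) &&
   new_software.all (fun d => d.any (fun p => p.1 == "name"))) = true
instance (software : List (List (String × String))) (new_software : List (List (String × String))) : Decidable (Pre_merge_software software new_software) := by unfold Pre_merge_software; infer_instance

def pvWitness_merge_software : (List (List (String × String))) × (List (List (String × String))) :=
  ([[("name", "a"), ("ver", "1")], [("name", "b")]], [[("name", "a"), ("ver", "2")]])

def Spec_merge_software (software : List (List (String × String))) (new_software : List (List (String × String))) (out : List (List (String × String))) : Prop := out = merge_software_alt software new_software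
instance (software : List (List (String × String))) (new_software : List (List (String × String))) (out : List (List (String × String))) : Decidable (Spec_merge_software software new_software out) := by unfold Spec_merge_software; infer_instance

-- ===== CLAIM (what is proved, stated in full; the proofs are below) =====
def Claim_equal_merge_software : Prop := ∀ (software : List (List (String × String))) (new_software : List (List (String × String))), Dom_merge_software software new_software → Pre_merge_software software new_software → Spec_merge_software software new_software (merge_software software new_software)

-- ===== LEMMAS AND PROOFS =====

-- characterisation of B's inner scan: winner = last same-named item, rest = the others
lemma pvScan_spec (n : Option String) (w : List (String × String))
    (acc : List (List (String × String))) (xs : List (List (String × String))) :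
    pvScan n w acc xs =
      ((xs.filter (fun x => pvNameB x = n)).getLastD w,
       acc ++ xs.filter (fun x => ¬ (pvNameB x = n))) := by
  induction xs generalizing w acc with
  | nil => simp [pvScan]
  | cons x xs ih =>
    by_cases h : pvNameB x = n
    · rw [pvScan, if_pos h, ih, List.filter_cons_of_pos (by simpa using h),
        List.getLastD_cons, List.filter_cons_of_neg (by simpa using h)]
    · rw [pvScan, if_neg h, ih, List.filter_cons_of_neg (by simpa using h),
        List.filter_cons_of_pos (by simpa using h)]
      simp

-- last item of l carrying name n
def pvLastW (n : Option String) (l : List (List (String × String))) : List (String × String) :=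
  (l.filter (fun x => pvName x = n)).getLastD []

lemma pvOfList_append_singleton (ns : List (Option String)) (n : Option String) :
    PySem.Set.ofList (ns ++ [n])
      = if n ∈ ns then PySem.Set.ofList ns else PySem.Set.ofList ns ++ [n] := by
  rw [PySem.Set.ofList_eq_foldl, List.foldl_append, ← PySem.Set.ofList_eq_foldl]
  by_cases h : n ∈ ns <;>
    simp [PySem.Set.add, PySem.Set.contains, PySem.Set.mem_ofList, h]

lemma pvUpdate_filter (n : Option String) (ns : List (Option String))
    (acc : List (Option String)) (h : n ∈ acc) :
    PySem.Set.update acc ns = PySem.Set.update acc (ns.filter (fun m => ¬ (m = n))) := by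
  induction ns generalizing acc with
  | nil => rfl
  | cons x ns ih =>
    by_cases hx : x = n
    · subst hx
      rw [List.filter_cons_of_neg (by simp)]
      have : PySem.Set.add acc x = acc := by
        simp [PySem.Set.add, PySem.Set.contains, h]
      calc PySem.Set.update acc (x :: ns)
          = PySem.Set.update (PySem.Set.add acc x) ns := rfl
        _ = PySem.Set.update acc ns := by rw [this]
        _ = _ := ih acc h
    · rw [List.filter_cons_of_pos (by simpa using hx)]
      calc PySem.Set.update acc (x :: ns)
          = PySem.Set.update (PySem.Set.add acc x) ns := rfl
        _ = _ := by
            rw [ih (PySem.Set.add acc x)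
              (by simp [PySem.Set.add]; split <;> simp [h])]
            rfl

lemma pvUpdate_cons (n : Option String) (ns : List (Option String))
    (acc : List (Option String)) (h : n ∉ ns) :
    PySem.Set.update (n :: acc) ns = n :: PySem.Set.update acc ns := by
  induction ns generalizing acc with
  | nil => rfl
  | cons x ns ih =>
    have hx : x ≠ n := fun hxn => h (hxn ▸ List.mem_cons_self)
    have hadd : PySem.Set.add (n :: acc) x = n :: PySem.Set.add acc x := by
      simp only [PySem.Set.add, PySem.Set.contains]
      by_cases hm : x ∈ acc <;> simp [hm, hx]
    calc PySem.Set.update (n :: acc) (x :: ns)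
        = PySem.Set.update (PySem.Set.add (n :: acc) x) ns := rfl
      _ = PySem.Set.update (n :: PySem.Set.add acc x) ns := by rw [hadd]
      _ = n :: PySem.Set.update (PySem.Set.add acc x) ns :=
          ih _ (fun hn => h (List.mem_cons_of_mem _ hn))
      _ = _ := rfl

lemma pvOfList_cons_filter (n : Option String) (ns : List (Option String)) :
    PySem.Set.ofList (n :: ns)
      = n :: PySem.Set.ofList (ns.filter (fun m => ¬ (m = n))) := by
  have h1 : PySem.Set.ofList (n :: ns) = PySem.Set.update [n] ns := by
    rw [PySem.Set.ofList_eq_foldl, PySem.Set.update]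
    rfl
  rw [h1, pvUpdate_filter n ns [n] (List.mem_singleton.mpr rfl),
    pvUpdate_cons n _ [] (by simp), PySem.Set.update, ← PySem.Set.ofList_eq_foldl]

lemma pvLastW_append_singleton (l : List (List (String × String)))
    (x : List (String × String)) (m : Option String) :
    pvLastW m (l ++ [x]) = if pvName x = m then x else pvLastW m l := by
  by_cases h : pvName x = m
  · rw [if_pos h, pvLastW, List.filter_append,
      List.filter_cons_of_pos (by simpa using h), List.filter_nil, List.getLastD_concat]
  · rw [if_neg h, pvLastW, List.filter_append,
      List.filter_cons_of_neg (by simpa using h), List.filter_nil, List.append_nil, pvLastW]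

-- A's dict after folding the whole input, in first-occurrence/last-value form
lemma pvA_items (l : List (List (String × String))) :
    (l.foldl pvStepA PySem.Dict.empty).items
      = (PySem.Set.ofList (l.map pvName)).map (fun n => (n, pvLastW n l)) := by
  induction l using List.reverseRecOn with
  | nil => rfl
  | append_singleton l x ih =>
    have hkeys : (l.foldl pvStepA PySem.Dict.empty).keys
        = PySem.Set.ofList (l.map pvName) := by
      show ((l.foldl pvStepA PySem.Dict.empty).items).map (fun p => p.1) = _
      rw [ih, List.map_map]
      simp [Function.comp_def]
    rw [List.foldl_append, List.foldl_cons, List.foldl_nil, List.map_append,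
      List.map_cons, List.map_nil, pvOfList_append_singleton]
    by_cases hc : (l.foldl pvStepA PySem.Dict.empty).contains (pvName x) = true
    · -- name already present: the dict overwrites in place
      have hmem : pvName x ∈ l.map pvName := by
        have := (PySem.Dict.contains_iff_mem_keys _ _).mp hc
        rw [hkeys, PySem.Set.mem_ofList] at this
        exact this
      rw [if_pos hmem, pvStepA, PySem.Dict.items_insert_of_contains _ _ hc, ih,
        List.map_map]
      apply List.map_congr_left
      intro m _
      by_cases h : m = pvName x
      · subst h
        simp [Function.comp, pvLastW_append_singleton]
      · have h' : pvName x ≠ m := fun he => h he.symm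
        simp [Function.comp, pvLastW_append_singleton, h, h']
    · -- new name: the dict appends
      have hc' : (l.foldl pvStepA PySem.Dict.empty).contains (pvName x) = false := by
        simpa using hc
      have hnmem : pvName x ∉ l.map pvName := fun hm =>
        hc ((PySem.Dict.contains_iff_mem_keys _ _).mpr
          (hkeys ▸ (PySem.Set.mem_ofList _ _).mpr hm))
      rw [if_neg hnmem, pvStepA, PySem.Dict.items_insert_of_not_contains _ _ hc', ih,
        List.map_append, List.map_cons, List.map_nil]
      congr 1
      · apply List.map_congr_left
        intro m hm
        have hmn : pvName x ≠ m := fun h =>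
          hnmem (h ▸ (PySem.Set.mem_ofList _ _).mp hm)
        rw [pvLastW_append_singleton, if_neg hmn]
      · rw [pvLastW_append_singleton, if_pos rfl]

-- the two ports' name lookups are the same function
lemma pvNameB_eq : pvNameB = pvName := rfl

-- B's selection loop computes the same first-occurrence/last-value form
lemma pvGo_eq (l : List (List (String × String))) :
    pvGo l = (PySem.Set.ofList (l.map pvName)).map (fun n => pvLastW n l) := by
  induction l using pvGo.induct with
  | case1 => rw [pvGo]; rfl
  | case2 head t ih =>
    rw [pvGo]
    simp only [pvScan_spec, pvNameB_eq, List.nil_append] at ih ⊢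
    have hrest : (t.map pvName).filter (fun m => ¬ (m = pvName head))
        = (t.filter (fun x => ¬ (pvName x = pvName head))).map pvName := by
      rw [List.filter_map]; rfl
    rw [List.map_cons, pvOfList_cons_filter, List.map_cons, ih, hrest]
    congr 1
    · -- the winner is the last item named like the head
      rw [pvLastW, List.filter_cons_of_pos (by simp), List.getLastD_cons]
      rfl
    · -- dropping the head's name does not disturb the other names' last items
      apply List.map_congr_left
      intro m hm
      have hmem := (PySem.Set.mem_ofList _ _).mp hm
      have hmn : m ≠ pvName head := by
        obtain ⟨y, hy, hym⟩ := List.mem_map.mp hmem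
        have hne := (List.mem_filter.mp hy).2
        simp only [decide_not, Bool.not_eq_eq_eq_not, Bool.not_true,
          decide_eq_false_iff_not] at hne
        exact hym ▸ hne
      rw [pvLastW, pvLastW, List.filter_cons_of_neg (by simpa using fun h => hmn h.symm),
        List.filter_filter]
      congr 1
      apply List.filter_congr
      intro x _
      by_cases hx : pvName x = m
      · simp [hx, hmn]
      · simp [hx]

-- ===== VERDICT (by name: the statement is the Claim_ definition above) =====
theorem merge_software_spec : Claim_equal_merge_software := by
  intro software new_software _ _
  show merge_software software new_software = merge_software_alt software new_software
  rw [merge_software, merge_software_alt,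
    PySem.List.foldl_append_singleton_eq_map (fun p : Option String × List (String × String) => p.2) _ [],
    ← List.foldl_append, pvA_items, pvGo_eq, List.map_map, List.nil_append]
  rfl
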